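-- pv_equiv track=rewrite | github.com/Wilhelmroentgen/REDFLOW | redflow/nodes/render_graphs.py | _domain_levels
-- ===== SOURCE A (Python) =====
-- from typing import Dict, Any, List, DefaultDict
--
-- def _domain_levels(domain: str) -> List[str]:
--     # ejemplo: a.b.c.example.com -> ["example.com","c.example.com","b.c.example.com","a.b.c.example.com"]
--     parts = domain.split(".")
--     if len(parts) < 2:
--         return []
--     levels = []
--     for i in range(len(parts)-2, -1, -1):
--         levels.append(".".join(parts[i:]))
--     return levels
-- ===== SOURCE B (Python) =====
-- def _domain_levels(domain):
--     def suffixes(parts):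
--         if len(parts) < 2:
--             return []
--         return suffixes(parts[1:]) + [".".join(parts)]
--     return suffixes(domain.split("."))
-- ===== Notes on version B (the rewrite author's own statement) =====
-- stated objective: alternative
-- what changed: B replaces A's indexed range loop with an append-accumulator by a structural recursion on the parts list: the result for p::rest is the result for rest followed by the join of the whole list, so no range, no indices and no slicing by index are used.
import Mathlib
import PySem

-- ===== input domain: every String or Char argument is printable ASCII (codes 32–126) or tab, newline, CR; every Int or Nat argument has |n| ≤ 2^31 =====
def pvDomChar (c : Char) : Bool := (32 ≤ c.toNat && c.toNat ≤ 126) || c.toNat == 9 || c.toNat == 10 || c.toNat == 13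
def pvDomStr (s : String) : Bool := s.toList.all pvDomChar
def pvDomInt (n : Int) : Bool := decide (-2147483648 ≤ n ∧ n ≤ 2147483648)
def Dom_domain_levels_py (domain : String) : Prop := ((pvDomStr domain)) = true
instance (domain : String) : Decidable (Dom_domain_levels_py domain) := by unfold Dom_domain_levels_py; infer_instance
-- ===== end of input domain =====

-- B builds the levels by structural recursion on the parts list instead of A's indexed range loop (alternative decomposition).

-- ===== PORT A =====
-- split? "." is never none (separator nonempty), so getD [] is exact for domain.split(".")
def domain_levels_py (domain : String) : List String :=
  let parts := (PySem.Str.split? domain ".").getD []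
  if parts.length < 2 then []
  else
    (PySem.List.pyRange ((parts.length : Int) - 2) (-1) (-1)).foldl
      (fun levels i => levels ++ [PySem.Str.join "." (PySem.List.slice parts (some i) none)]) []

-- ===== PORT B =====
-- inner helper 'suffixes' of Source B: recursion on the parts list
def domain_levels_py_suffixes (parts : List String) : List String :=
  if parts.length < 2 then []
  else domain_levels_py_suffixes (parts.drop 1) ++ [PySem.Str.join "." parts]
termination_by parts.length
decreasing_by simp; omega

def domain_levels_py_alt (domain : String) : List String :=
  domain_levels_py_suffixes ((PySem.Str.split? domain ".").getD [])

-- ===== PRECONDITION & SPEC =====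
def Spec_domain_levels_py (domain : String) (out : List String) : Prop := out = domain_levels_py_alt domain
instance (domain : String) (out : List String) : Decidable (Spec_domain_levels_py domain out) := by unfold Spec_domain_levels_py; infer_instance

-- ===== CLAIM (what is proved, stated in full; the proofs are below) =====
def Claim_equal_domain_levels_py : Prop := ∀ (domain : String), Dom_domain_levels_py domain → Spec_domain_levels_py domain (domain_levels_py domain)

-- ===== LEMMAS AND PROOFS =====

-- the suffix join ".".join(parts[i:])
def pvSuf (parts : List String) (i : Nat) : String :=
  PySem.Str.join "." (parts.drop i)

theorem pv_A_map (parts : List String) (h : 2 ≤ parts.length) :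
    (PySem.List.pyRange ((parts.length : Int) - 2) (-1) (-1)).foldl
      (fun levels i => levels ++ [PySem.Str.join "." (PySem.List.slice parts (some i) none)]) []
    = (List.range (parts.length - 1)).map (fun k => pvSuf parts (parts.length - 2 - k)) := by
  rw [PySem.List.foldl_append_singleton_eq_map, List.nil_append, PySem.List.pyRange_neg_one,
      List.map_map]
  rw [show ((parts.length : Int) - 2 - (-1)).toNat = parts.length - 1 by omega]
  apply List.map_congr_left
  intro k hk
  simp only [List.mem_range] at hk
  simp only [Function.comp]
  rw [show (parts.length : Int) - 2 - (k : Nat) = ((parts.length - 2 - k : Nat) : Int) by omega,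
      PySem.List.slice_from_natCast]
  rfl

theorem pv_B_map (parts : List String) :
    domain_levels_py_suffixes parts
    = (List.range (parts.length - 1)).map (fun k => pvSuf parts (parts.length - 2 - k)) := by
  induction parts with
  | nil => simp [domain_levels_py_suffixes]
  | cons p rest ih =>
    by_cases h : (p :: rest).length < 2
    · have hr : rest = [] := by
        cases rest with
        | nil => rfl
        | cons q t => simp at h
      simp [domain_levels_py_suffixes, hr]
    · rw [domain_levels_py_suffixes, if_neg h]
      simp only [List.length_cons] at h ⊢
      have hm : 1 ≤ rest.length := by omega
      rw [List.drop_one, List.tail_cons, ih]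
      rw [show rest.length + 1 - 1 = (rest.length - 1) + 1 by omega, List.range_succ,
          List.map_append]
      congr 1
      · apply List.map_congr_left
        intro k hk
        simp only [List.mem_range] at hk
        have : rest.length + 1 - 2 - k = (rest.length - 2 - k) + 1 := by omega
        rw [this]
        simp [pvSuf]
      · simp only [List.map_cons, List.map_nil]
        rw [show rest.length + 1 - 2 - (rest.length - 1) = 0 by omega]
        rfl

-- ===== VERDICT (by name: the statement is the Claim_ definition above) =====
theorem domain_levels_py_spec : Claim_equal_domain_levels_py := by
  intro domain _
  unfold Spec_domain_levels_py
  simp only [domain_levels_py, domain_levels_py_alt]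
  generalize (PySem.Str.split? domain ".").getD [] = parts
  by_cases h2 : parts.length < 2
  · rw [if_pos h2, pv_B_map parts]
    have : parts.length - 1 = 0 := by omega
    simp [this]
  · rw [if_neg h2, pv_A_map parts (by omega), pv_B_map parts]
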